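-- pv_equiv track=rewrite | github.com/tiago-ferrari/sasc | backend/app/utils.py | symbol_treat
-- ===== SOURCE A (Python) =====
-- def symbol_treat(input):
--     symbols = {
--         "&": "and_symbol",
--         "(": "parentheses_left_symbol",
--         ")": "parentheses_right_symbol",
--     }
--
--     for symbol in symbols:
--         input = input.replace(symbol, symbols[symbol])
--
--     return input
-- ===== SOURCE B (Python) =====
-- def symbol_treat(input):
--     symbols = {
--         "&": "and_symbol",
--         "(": "parentheses_left_symbol",
--         ")": "parentheses_right_symbol",
--     }
--     return "".join(symbols.get(ch, ch) for ch in input)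
-- ===== Notes on version B (the rewrite author's own statement) =====
-- stated objective: alternative
-- what changed: Replaces the three whole-string replace() passes with a single per-character pass that joins symbols.get(ch, ch); correct because no replacement string contains &, ( or ), so the passes cannot cascade.
import Mathlib
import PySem

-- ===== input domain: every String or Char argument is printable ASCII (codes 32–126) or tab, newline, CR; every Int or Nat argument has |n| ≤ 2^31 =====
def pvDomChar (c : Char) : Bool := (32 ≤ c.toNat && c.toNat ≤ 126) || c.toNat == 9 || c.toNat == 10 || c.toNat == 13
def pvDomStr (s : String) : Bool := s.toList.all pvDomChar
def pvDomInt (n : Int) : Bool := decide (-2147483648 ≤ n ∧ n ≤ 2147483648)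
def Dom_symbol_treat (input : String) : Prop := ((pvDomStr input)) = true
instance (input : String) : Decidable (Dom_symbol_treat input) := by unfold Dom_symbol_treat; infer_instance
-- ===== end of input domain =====

-- B replaces A's three whole-string replace() passes by one per-character pass joining
-- symbols.get(ch, ch); same output since no replacement string contains &, ( or ).

-- ===== PORT A =====
-- dict iteration order = insertion order: "&", "(", ")"
def symbol_treat (input : String) : String :=
  let i1 := PySem.Str.replace input "&" "and_symbol"
  let i2 := PySem.Str.replace i1 "(" "parentheses_left_symbol"
  PySem.Str.replace i2 ")" "parentheses_right_symbol"

-- ===== PORT B =====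
-- symbols.get(ch, ch) for the three-entry dict, as a direct case split
def symGet (c : Char) : String :=
  if c = '&' then "and_symbol"
  else if c = '(' then "parentheses_left_symbol"
  else if c = ')' then "parentheses_right_symbol"
  else String.ofList [c]

def symbol_treat_alt (input : String) : String :=
  PySem.Str.join "" (input.toList.map symGet)

-- ===== PRECONDITION & SPEC =====
def Spec_symbol_treat (input : String) (out : String) : Prop := out = symbol_treat_alt input
instance (input : String) (out : String) : Decidable (Spec_symbol_treat input out) := by unfold Spec_symbol_treat; infer_instance

-- ===== CLAIM (what is proved, stated in full; the proofs are below) =====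
def Claim_equal_symbol_treat : Prop := ∀ (input : String), Dom_symbol_treat input → Spec_symbol_treat input (symbol_treat input)

-- ===== LEMMAS AND PROOFS =====

-- single-character expansion performed by one replace() pass
def expand1 (c : Char) (new : List Char) (x : Char) : List Char :=
  if x = c then new else [x]

theorem replace_go_single (c : Char) (new : List Char) :
    ∀ (l acc : List Char),
      PySem.Chars.replace.go [c] new l.length l acc = acc.reverse ++ l.flatMap (expand1 c new) := by
  intro l
  induction l with
  | nil => intro acc; simp [PySem.Chars.replace.go]
  | cons x t ih =>
    intro acc
    simp only [List.length_cons, PySem.Chars.replace.go]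
    by_cases h : x = c
    · subst h
      simp [List.isPrefixOf, ih, expand1]
    · simp [List.isPrefixOf, h, ih, Ne.symm h, expand1]

theorem replace_single (l : List Char) (c : Char) (new : List Char) :
    PySem.Chars.replace l [c] new = l.flatMap (expand1 c new) := by
  simpa [PySem.Chars.replace] using replace_go_single c new l []

theorem intercalate_nil_flatten (parts : List (List Char)) :
    ([] : List Char).intercalate parts = parts.flatten := by
  induction parts with
  | nil => rfl
  | cons p ps ih => cases ps <;> simp_all [List.intercalate]

theorem expand_compose (x : Char) :
    ((expand1 '&' "and_symbol".toList x).flatMap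
        (expand1 '(' "parentheses_left_symbol".toList)).flatMap
      (expand1 ')' "parentheses_right_symbol".toList) = (symGet x).toList := by
  by_cases h1 : x = '&'
  · subst h1; decide
  · by_cases h2 : x = '('
    · subst h2; decide
    · by_cases h3 : x = ')'
      · subst h3; decide
      · simp [expand1, symGet, h1, h2, h3, String.toList_ofList]

-- ===== VERDICT (by name: the statement is the Claim_ definition above) =====
theorem symbol_treat_spec : Claim_equal_symbol_treat := by
  intro input _
  unfold Spec_symbol_treat symbol_treat symbol_treat_alt
  apply String.toList_inj.mp
  simp only [PySem.Str.replace, String.toList_ofList, PySem.Str.join, PySem.Chars.join]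
  rw [show ("".toList : List Char) = [] from rfl, intercalate_nil_flatten,
      show ("&".toList : List Char) = ['&'] from rfl,
      show ("(".toList : List Char) = ['('] from rfl,
      show (")".toList : List Char) = [')'] from rfl]
  rw [replace_single, replace_single, replace_single, List.flatMap_assoc, List.flatMap_assoc,
      List.map_map, ← List.flatMap_def]
  congr 1
  funext x
  rw [← List.flatMap_assoc, expand_compose]
  rfl
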